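-- pv_equiv track=rewrite | github.com/dfidalg0/ces22python1 | ex4.py | sum_except_first_even
-- ===== SOURCE A (Python) =====
-- def sum_except_first_even (L):
--     s = 0
--     found_even = False
--     for number in L:
--         if not found_even and number % 2 == 1:
--             found_even = True
--         else:
--             s += number
--
--     return s
-- ===== SOURCE B (Python) =====
-- def sum_except_first_even(L):
--     idx = next((j for j, x in enumerate(L) if x % 2 == 1), None)
--     if idx is None:
--         return sum(L)
--     return sum(x for j, x in enumerate(L) if j != idx)
-- ===== Notes on version B (the rewrite author's own statement) =====
-- stated objective: alternative
-- what changed: Replaces A's single flag-carrying accumulator loop by two separately-shaped passes: first locate the index of the first odd element, then sum via an enumerate-filter generator (or plain sum(L) if none), removing the interleaved state flag.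
import Mathlib
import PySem

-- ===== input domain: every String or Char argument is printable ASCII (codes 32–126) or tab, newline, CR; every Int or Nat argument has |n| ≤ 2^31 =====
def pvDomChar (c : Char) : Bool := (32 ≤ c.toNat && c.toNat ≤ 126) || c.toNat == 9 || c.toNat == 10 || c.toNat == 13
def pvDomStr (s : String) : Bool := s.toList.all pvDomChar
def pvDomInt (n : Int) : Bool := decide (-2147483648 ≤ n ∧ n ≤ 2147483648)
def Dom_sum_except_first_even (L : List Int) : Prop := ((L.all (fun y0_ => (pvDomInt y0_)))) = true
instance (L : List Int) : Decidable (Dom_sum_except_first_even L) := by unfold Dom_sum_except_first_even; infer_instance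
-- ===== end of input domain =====

-- B replaces A's flag-carrying single loop by two separately-shaped passes (locate the
-- first odd element's index, then sum via an enumerate filter); objective: alternative.

-- ===== PORT A =====
def sum_except_first_even (L : List Int) : Int :=
  (L.foldl (fun st number =>
      if !st.2 && (PySem.Int.mod number 2 == 1) then (st.1, true)
      else (st.1 + number, st.2))
    ((0 : Int), false)).1

-- ===== PORT B =====
-- next((j for j, x in enumerate(L) if x % 2 == 1), None)
def pvFirstOddIdx : List Int → Int → Option Int
  | [], _ => none
  | x :: xs, j => if PySem.Int.mod x 2 == 1 then some j else pvFirstOddIdx xs (j + 1)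

def sum_except_first_even_alt (L : List Int) : Int :=
  match pvFirstOddIdx L 0 with
  | none => L.foldl (· + ·) 0
  | some idx =>
      (PySem.List.enumerate L 0).foldl (fun s p => if p.1 == idx then s else s + p.2) 0

-- ===== PRECONDITION & SPEC =====
def Spec_sum_except_first_even (L : List Int) (out : Int) : Prop := out = sum_except_first_even_alt L
instance (L : List Int) (out : Int) : Decidable (Spec_sum_except_first_even L out) := by unfold Spec_sum_except_first_even; infer_instance

-- ===== CLAIM (what is proved, stated in full; the proofs are below) =====
def Claim_equal_sum_except_first_even : Prop := ∀ (L : List Int), Dom_sum_except_first_even L → Spec_sum_except_first_even L (sum_except_first_even L)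

-- ===== LEMMAS AND PROOFS =====

lemma pvFoldA_true (xs : List Int) (s : Int) :
    xs.foldl (fun st number =>
      if !st.2 && (PySem.Int.mod number 2 == 1) then (st.1, true)
      else (st.1 + number, st.2)) (s, true) = (xs.foldl (· + ·) s, true) := by
  induction xs generalizing s with
  | nil => rfl
  | cons x xs ih =>
      simp only [List.foldl_cons, Bool.not_true, Bool.false_and, Bool.false_eq_true, if_false]
      exact ih (s + x)

lemma pvFoldB_noskip (xs : List Int) (j idx s : Int) (h : idx < j) :
    (PySem.List.enumerate xs j).foldl (fun s p => if p.1 == idx then s else s + p.2) s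
      = xs.foldl (· + ·) s := by
  induction xs generalizing j s with
  | nil => rfl
  | cons x xs ih =>
      have hne : (j == idx) = false := by
        simp only [beq_eq_false_iff_ne, ne_eq]; omega
      simp only [PySem.List.enumerate_cons, List.foldl_cons, hne, Bool.false_eq_true, if_false]
      exact ih (j + 1) (s + x) (by omega)

lemma pvFirstOddIdx_ge (xs : List Int) (j idx : Int)
    (h : pvFirstOddIdx xs j = some idx) : j ≤ idx := by
  induction xs generalizing j with
  | nil => simp [pvFirstOddIdx] at h
  | cons x xs ih =>
      rw [pvFirstOddIdx] at h
      by_cases hx : (PySem.Int.mod x 2 == 1) = true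
      · rw [if_pos hx] at h
        have : j = idx := by injection h
        omega
      · rw [if_neg (by simpa using hx)] at h
        have := ih (j + 1) h
        omega

lemma pvKey (xs : List Int) (s j : Int) :
    (xs.foldl (fun st number =>
      if !st.2 && (PySem.Int.mod number 2 == 1) then (st.1, true)
      else (st.1 + number, st.2)) (s, false)).1
    = (match pvFirstOddIdx xs j with
       | none => xs.foldl (· + ·) s
       | some idx =>
           (PySem.List.enumerate xs j).foldl (fun s p => if p.1 == idx then s else s + p.2) s) := by
  induction xs generalizing s j with
  | nil => rfl
  | cons x xs ih =>
      by_cases hx : (PySem.Int.mod x 2 == 1) = true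
      · rw [pvFirstOddIdx, if_pos hx]
        simp only [List.foldl_cons, Bool.not_false, Bool.true_and, hx, if_true, pvFoldA_true,
          PySem.List.enumerate_cons, beq_self_eq_true]
        exact (pvFoldB_noskip xs (j + 1) j s (by omega)).symm
      · have hx' : (PySem.Int.mod x 2 == 1) = false := by simpa using hx
        rw [pvFirstOddIdx]
        simp only [hx', Bool.false_eq_true, if_false]
        simp only [List.foldl_cons, Bool.not_false, Bool.true_and, hx', Bool.false_eq_true, if_false]
        rw [ih (s + x) (j + 1)]
        cases hfind : pvFirstOddIdx xs (j + 1) with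
        | none => simp
        | some idx =>
            have hge := pvFirstOddIdx_ge xs (j + 1) idx hfind
            have hne : (j == idx) = false := by
              simp only [beq_eq_false_iff_ne, ne_eq]; omega
            simp only [PySem.List.enumerate_cons, List.foldl_cons, hne, Bool.false_eq_true, if_false]

-- ===== VERDICT (by name: the statement is the Claim_ definition above) =====
theorem sum_except_first_even_spec : Claim_equal_sum_except_first_even := by
  intro L _
  unfold Spec_sum_except_first_even sum_except_first_even sum_except_first_even_alt
  exact pvKey L 0 0
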